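-- pv_equiv track=rewrite | github.com/SanjivKannaa/CSLR52_networks_lab | lab1/3/server.py | function
-- ===== SOURCE A (Python) =====
-- def function(data):
--     arr1 = []
--     arr2 = []
--     flag = False
--     for i in data:
--         if i=="|":
--             flag = True
--         elif not flag:
--             if i != " ":
--                 arr1.append(int(i))
--         else:
--             if i != " ":
--                 arr2.append(int(i))
--     for i in arr1:
--         if int(i)!=i or i%2!=0:
--             return ""
--     for i in arr2:
--         if int(i)!=i or i%2!=0:
--             return ""
--     if len(arr1)!=len(arr2):
--         return ""
--     result = []
--     for i in range(len(arr1)):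
--         result.append(arr1[i] + arr2[i])
--     return str(result)
-- ===== SOURCE B (Python) =====
-- def function(data):
--     # One pass: queue up left-half values, then pair each right-half value
--     # with the next queued one on the fly; no second list, no separate
--     # validation or summing passes.
--     queue = []      # unpaired values from before the first '|'
--     head = 0        # next queue slot to pair
--     sums = []
--     even = True
--     seen_pipe = False
--     for ch in data:
--         if ch == '|':
--             seen_pipe = True
--         elif ch != ' ':
--             v = int(ch)
--             even = even and v % 2 == 0
--             if not seen_pipe:
--                 queue.append(v)
--             elif head < len(queue):
--                 sums.append(queue[head] + v)
--                 head += 1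
--             else:
--                 return ""   # right half longer than left
--     if not even or head != len(queue):
--         return ""
--     return str(sums)
-- ===== Notes on version B (the rewrite author's own statement) =====
-- stated objective: alternative
-- what changed: Single streaming pass that pairs each right-half digit with the next queued left-half value on the fly (queue + head pointer, early exit on overrun), maintaining a running parity flag and the sums list, instead of A's parse-both-lists-then-validate-then-index-sum staging.
import Mathlib
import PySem

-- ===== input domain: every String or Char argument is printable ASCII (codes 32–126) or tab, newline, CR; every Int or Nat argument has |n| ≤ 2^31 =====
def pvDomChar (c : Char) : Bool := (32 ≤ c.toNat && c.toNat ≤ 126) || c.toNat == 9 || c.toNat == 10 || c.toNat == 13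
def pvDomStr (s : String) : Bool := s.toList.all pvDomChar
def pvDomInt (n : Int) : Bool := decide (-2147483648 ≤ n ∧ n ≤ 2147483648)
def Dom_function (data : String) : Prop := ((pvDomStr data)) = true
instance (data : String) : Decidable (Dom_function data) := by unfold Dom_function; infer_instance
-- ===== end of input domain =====

-- B replaces A's parse-both-lists / validate / index-sum staging with one streaming pass that
-- pairs each right-half digit with the next queued left-half value on the fly (objective: alternative).

-- int(c) for a single character c (shared by both ports; Python int() raises outside Pre_, here defaulted)
def pvCharInt (c : Char) : Int := (PySem.Int.ofStr? (String.ofList [c])).getD 0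

-- str([x1, ..., xn]) for a list of ints (Python's repr of an int list; both Pythons end with str(...))
def pvStrIntList (xs : List Int) : String :=
  "[" ++ String.intercalate ", " (xs.map PySem.Int.toStr) ++ "]"

-- ===== PORT A =====
def pvStepA (st : List Int × List Int × Bool) (i : Char) : List Int × List Int × Bool :=
  if i = '|' then (st.1, st.2.1, true)
  else if st.2.2 = false then
    (if i ≠ ' ' then (st.1 ++ [pvCharInt i], st.2.1, st.2.2) else st)
  else
    (if i ≠ ' ' then (st.1, st.2.1 ++ [pvCharInt i], st.2.2) else st)

def function (data : String) : String :=
  let st := data.toList.foldl pvStepA ([], [], false)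
  let arr1 := st.1
  let arr2 := st.2.1
  if arr1.any (fun i => (i != i) || (PySem.Int.mod i 2 != 0)) then ""
  else if arr2.any (fun i => (i != i) || (PySem.Int.mod i 2 != 0)) then ""
  else if arr1.length ≠ arr2.length then ""
  else
    let result := (PySem.List.pyRange 0 (arr1.length : Int) 1).foldl
      (fun acc i => acc ++ [PySem.List.pyGetD arr1 i 0 + PySem.List.pyGetD arr2 i 0]) []
    pvStrIntList result

-- ===== PORT B =====
-- the streaming loop of Source B, with its early 'return ""' as a direct result
def pvGoB (cs : List Char) (queue : List Int) (head : Nat) (sums : List Int)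
    (even : Bool) (seen : Bool) : String :=
  match cs with
  | [] => if !even || head ≠ queue.length then "" else pvStrIntList sums
  | c :: rest =>
    if c = '|' then pvGoB rest queue head sums even true
    else if c = ' ' then pvGoB rest queue head sums even seen
    else
      let v := pvCharInt c
      let even' := even && (PySem.Int.mod v 2 == 0)
      if seen = false then pvGoB rest (queue ++ [v]) head sums even' seen
      else if head < queue.length then
        pvGoB rest queue (head + 1) (sums ++ [queue.getD head 0 + v]) even' seen
      else ""

def function_alt (data : String) : String :=
  pvGoB data.toList [] 0 [] true false

-- ===== PRECONDITION & SPEC =====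
-- Pre_: Python's int(c) raises ValueError on any character that is not a digit; spaces and separators never reach int().
def Pre_function (data : String) : Prop :=
  data.toList.all (fun c => c.isDigit || c == ' ' || c == '|') = true
instance (data : String) : Decidable (Pre_function data) := by unfold Pre_function; infer_instance

def pvWitness_function : String := "2 4|6 8"

def Spec_function (data : String) (out : String) : Prop := out = function_alt data
instance (data : String) (out : String) : Decidable (Spec_function data out) := by unfold Spec_function; infer_instance

-- ===== CLAIM (what is proved, stated in full; the proofs are below) =====
def Claim_equal_function : Prop := ∀ (data : String), Dom_function data → Pre_function data → Spec_function data (function data)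

-- ===== LEMMAS AND PROOFS =====

-- A-side: once the flag is set, A only appends the non-space non-'|' chars to arr2
theorem pvFoldTrue (cs : List Char) (a1 a2 : List Int) :
    cs.foldl pvStepA (a1, a2, true)
      = (a1, a2 ++ (cs.filter (fun c => c != ' ' && c != '|')).map pvCharInt, true) := by
  induction cs generalizing a2 with
  | nil => simp
  | cons c cs ih =>
    by_cases hp : c = '|'
    · subst hp; simp [pvStepA, ih]
    · by_cases hs : c = ' '
      · subst hs; simp [pvStepA, ih]
      · simp [pvStepA, hp, hs, ih]

-- A-side: before the flag is set, A collects the non-space chars before the first '|' into arr1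
theorem pvFoldFalse (cs : List Char) (a1 : List Int) :
    (cs.foldl pvStepA (a1, [], false)).1
        = a1 ++ ((cs.takeWhile (fun c => c != '|')).filter (fun c => c != ' ')).map pvCharInt
    ∧ (cs.foldl pvStepA (a1, [], false)).2.1
        = (((cs.dropWhile (fun c => c != '|')).drop 1).filter
            (fun c => c != ' ' && c != '|')).map pvCharInt := by
  induction cs generalizing a1 with
  | nil => simp
  | cons c cs ih =>
    by_cases hp : c = '|'
    · subst hp
      simp [pvStepA, pvFoldTrue]
    · by_cases hs : c = ' '
      · subst hs
        simpa [pvStepA, hp, List.takeWhile_cons, List.dropWhile_cons] using ih a1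
      · have := ih (a1 ++ [pvCharInt c])
        simpa [pvStepA, hp, hs, List.takeWhile_cons, List.dropWhile_cons, List.filter_cons] using this

theorem pvFoldlAppend (xs : List Int) (acc : List Int) :
    xs.foldl (fun acc x => acc ++ [x]) acc = acc ++ xs := by
  induction xs generalizing acc with
  | nil => simp
  | cons x xs ih => simp [ih]

-- A-side: the index-summing loop over range(len a) equals the pairwise-sum list
theorem pvSumLoop (a b : List Int) (h : a.length = b.length) :
    (PySem.List.pyRange 0 (a.length : Int) 1).foldl
        (fun acc i => acc ++ [PySem.List.pyGetD a i 0 + PySem.List.pyGetD b i 0]) []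
      = (a.zip b).map (fun p => p.1 + p.2) := by
  have hz : ((a.zip b).map (fun p => p.1 + p.2)).length = a.length := by
    simp [List.length_zip, h]
  have hcong : ∀ (acc : List Int), ∀ i ∈ PySem.List.pyRange 0 (a.length : Int) 1,
      acc ++ [PySem.List.pyGetD a i 0 + PySem.List.pyGetD b i 0]
        = acc ++ [PySem.List.pyGetD ((a.zip b).map (fun p => p.1 + p.2)) i 0] := by
    intro acc i hi
    rw [PySem.List.mem_pyRange_one] at hi
    obtain ⟨h0, hlt⟩ := hi
    obtain ⟨k, rfl⟩ := Int.eq_ofNat_of_zero_le h0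
    have hk : k < a.length := by exact_mod_cast hlt
    have hkb : k < b.length := by omega
    have hkz : k < ((a.zip b).map (fun p => p.1 + p.2)).length := by omega
    rw [PySem.List.pyGetD_natCast, PySem.List.pyGetD_natCast, PySem.List.pyGetD_natCast,
        List.getD_eq_getElem _ _ hk, List.getD_eq_getElem _ _ hkb, List.getD_eq_getElem _ _ hkz]
    simp [List.getElem_zip]
  rw [PySem.List.foldl_congr_mem _ _ _ _ hcong, ← hz,
      PySem.List.foldl_pyRange_zero_pyGetD' ((a.zip b).map (fun p => p.1 + p.2)) 0
        (fun acc x => acc ++ [x]) []]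
  exact pvFoldlAppend _ []

-- B-side, phase 2 (after the pipe): the stream pairs the remaining digits against queue.drop head
set_option maxRecDepth 4000 in
theorem pvGoTrue (cs : List Char) (queue sums : List Int) (head : Nat) (even : Bool)
    (hh : head ≤ queue.length) :
    pvGoB cs queue head sums even true =
      (if even
          && ((cs.filter (fun c => c != ' ' && c != '|')).map pvCharInt).all
              (fun v => PySem.Int.mod v 2 == 0)
          && (head + (cs.filter (fun c => c != ' ' && c != '|')).length == queue.length)
       then pvStrIntList (sums ++
          (((queue.drop head).zip ((cs.filter (fun c => c != ' ' && c != '|')).map pvCharInt)).map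
            (fun p => p.1 + p.2)))
       else "") := by
  induction cs generalizing head sums even with
  | nil =>
    cases even with
    | false => simp [pvGoB]
    | true =>
      by_cases hq : head = queue.length
      · simp [pvGoB, hq]
      · simp [pvGoB, hq]
  | cons c rest ih =>
    by_cases hp : c = '|'
    · subst hp; simpa [pvGoB] using ih sums head even hh
    · by_cases hs : c = ' '
      · subst hs; simpa [pvGoB] using ih sums head even hh
      · by_cases hlt : head < queue.length
        · have := ih (sums ++ [queue.getD head 0 + pvCharInt c]) (head + 1)
            (even && (PySem.Int.mod (pvCharInt c) 2 == 0)) (by omega)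
          rw [pvGoB]
          rw [if_neg hp, if_neg hs, if_neg (by decide : ¬ (true = false)), if_pos hlt]
          rw [this]
          have hdrop : queue.drop head = queue[head] :: queue.drop (head + 1) :=
            List.drop_eq_getElem_cons hlt
          have hgetD : queue.getD head 0 = queue[head] := List.getD_eq_getElem _ _ hlt
          have harith : (head + 1 + (rest.filter (fun c => c != ' ' && c != '|')).length
              == queue.length)
              = (head + ((rest.filter (fun c => c != ' ' && c != '|')).length + 1)
              == queue.length) := by
            congr 1; omega
          have hcf : (c != ' ' && c != '|') = true := by simp [hp, hs]
          simp only [List.filter_cons, hcf, if_true, List.map_cons, List.length_cons, List.all_cons]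
          rw [hdrop, hgetD, harith] -- align the two length conditions and expose the paired head
          simp only [List.zip_cons_cons, List.map_cons, Bool.and_assoc, List.append_assoc,
            List.singleton_append, List.cons_append, List.nil_append]
        · have hq : head = queue.length := by omega
          rw [pvGoB]
          rw [if_neg hp, if_neg hs, if_neg (by decide : ¬ (true = false)), if_neg hlt]
          have hne : head + (((c :: rest).filter (fun c => c != ' ' && c != '|')).length)
              ≠ queue.length := by
            simp [List.filter_cons, hp, hs]; omega
          rw [if_neg (by simp [hne])]

-- B-side, phase 1 (before the pipe): queue collects the left digits, then phase 2 pairs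
set_option maxRecDepth 4000 in
theorem pvGoFalse (cs : List Char) (queue : List Int) (even : Bool) :
    pvGoB cs queue 0 [] even false =
      (if even
          && (((cs.takeWhile (fun c => c != '|')).filter (fun c => c != ' ')).map pvCharInt).all
              (fun v => PySem.Int.mod v 2 == 0)
          && ((((cs.dropWhile (fun c => c != '|')).drop 1).filter
                (fun c => c != ' ' && c != '|')).map pvCharInt).all
              (fun v => PySem.Int.mod v 2 == 0)
          && ((((cs.dropWhile (fun c => c != '|')).drop 1).filter
                (fun c => c != ' ' && c != '|')).length
              == (queue ++ ((cs.takeWhile (fun c => c != '|')).filter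
                    (fun c => c != ' ')).map pvCharInt).length)
       then pvStrIntList
          (((queue ++ ((cs.takeWhile (fun c => c != '|')).filter (fun c => c != ' ')).map pvCharInt).zip
              ((((cs.dropWhile (fun c => c != '|')).drop 1).filter
                (fun c => c != ' ' && c != '|')).map pvCharInt)).map (fun p => p.1 + p.2))
       else "") := by
  induction cs generalizing queue even with
  | nil =>
    cases even with
    | false => simp [pvGoB]
    | true =>
      cases queue with
      | nil => simp [pvGoB, pvStrIntList]
      | cons q qs => simp [pvGoB]
  | cons c rest ih =>
    by_cases hp : c = '|'
    · subst hp
      rw [pvGoB, if_pos rfl]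
      have := pvGoTrue rest queue [] 0 even (Nat.zero_le _)
      rw [this]
      have ht : ('|' :: rest).takeWhile (fun c => c != '|') = [] := by simp
      have hd : ('|' :: rest).dropWhile (fun c => c != '|') = '|' :: rest := by simp
      rw [ht, hd]
      simp [Nat.zero_add, eq_comm (a := (0:Nat))]
    · by_cases hs : c = ' '
      · subst hs
        rw [pvGoB]
        rw [if_neg (by decide : ¬ (' ' = '|')), if_pos rfl]
        simpa [List.takeWhile_cons, List.dropWhile_cons, List.filter_cons] using ih queue even
      · rw [pvGoB]
        rw [if_neg hp, if_neg hs, if_pos rfl]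
        have := ih (queue ++ [pvCharInt c]) (even && (PySem.Int.mod (pvCharInt c) 2 == 0))
        rw [this]
        simp [List.takeWhile_cons, hp, List.dropWhile_cons, List.filter_cons, hs,
          Bool.and_assoc, List.append_assoc]

-- A's any-odd test is the negation of B's all-even test
theorem pvAnyNotAll (l : List Int) :
    (l.any fun i => PySem.Int.mod i 2 != 0) = !(l.all fun v => PySem.Int.mod v 2 == 0) := by
  induction l with
  | nil => simp
  | cons x xs ih =>
    rw [List.any_cons, List.all_cons, Bool.not_and, ih]
    rfl

-- ===== VERDICT (by name: the statement is the Claim_ definition above) =====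
theorem function_spec : Claim_equal_function := by
  intro data _ _
  show function data = function_alt data
  unfold function function_alt
  obtain ⟨h1, h2⟩ := pvFoldFalse data.toList []
  rw [pvGoFalse]
  set as := ((data.toList.takeWhile (fun c => c != '|')).filter (fun c => c != ' ')).map pvCharInt
    with has
  set bs := (((data.toList.dropWhile (fun c => c != '|')).drop 1).filter
      (fun c => c != ' ' && c != '|')).map pvCharInt with hbs
  have hlb : ((((data.toList.dropWhile (fun c => c != '|')).drop 1).filter
      (fun c => c != ' ' && c != '|'))).length = bs.length := by rw [hbs]; simp
  simp only [h1, h2, List.nil_append, bne_self_eq_false, Bool.false_or, pvAnyNotAll,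
    Bool.true_and, hlb]
  by_cases c1 : as.all (fun v => PySem.Int.mod v 2 == 0) = true
  · by_cases c2 : bs.all (fun v => PySem.Int.mod v 2 == 0) = true
    · simp only [c1, c2, Bool.not_true, Bool.true_and, Bool.and_true, Bool.false_eq_true, if_false]
      by_cases hlen : as.length = bs.length
      · rw [if_neg (not_ne_iff.mpr hlen), pvSumLoop as bs hlen, if_pos (by simp [hlen])]
      · rw [if_pos hlen, if_neg (by simp; omega)]
    · have hb : (bs.all fun v => PySem.Int.mod v 2 == 0) = false := by
        revert c2; cases bs.all fun v => PySem.Int.mod v 2 == 0 <;> simp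
      simp only [c1, hb, Bool.not_true, Bool.not_false, Bool.true_and, Bool.false_and,
        Bool.and_false]
      simp
  · have ha : (as.all fun v => PySem.Int.mod v 2 == 0) = false := by
      revert c1; cases as.all fun v => PySem.Int.mod v 2 == 0 <;> simp
    simp only [ha, Bool.not_false, Bool.false_and]
    simp
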